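-- pv_equiv track=rewrite | github.com/binsoy69/egg-sentry | edge/stabilizer.py | rolling_mode
-- ===== SOURCE A (Python) =====
-- from collections import Counter, deque
--
-- def rolling_mode(values: list[int]) -> int:
--     if not values:
--         return 0
--
--     counts = Counter(values)
--     max_frequency = max(counts.values())
--     candidates = {value for value, frequency in counts.items() if frequency == max_frequency}
--
--     for value in reversed(values):
--         if value in candidates:
--             return value
--
--     return values[-1]
-- ===== SOURCE B (Python) =====
-- from collections import Counter
--
-- def rolling_mode(values: list[int]) -> int:
--     if not values:
--         return 0
--     counts = Counter(values)
--     last_index = {v: i for i, v in enumerate(values)}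
--     return max(counts.items(), key=lambda kv: (kv[1], last_index[kv[0]]))[0]
-- ===== Notes on version B (the rewrite author's own statement) =====
-- stated objective: idiomatic
-- what changed: Replaces A's max-frequency candidate set plus reversed membership scan with a last-occurrence index table and a single lexicographic argmax over the distinct values of the Counter.
import Mathlib
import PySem

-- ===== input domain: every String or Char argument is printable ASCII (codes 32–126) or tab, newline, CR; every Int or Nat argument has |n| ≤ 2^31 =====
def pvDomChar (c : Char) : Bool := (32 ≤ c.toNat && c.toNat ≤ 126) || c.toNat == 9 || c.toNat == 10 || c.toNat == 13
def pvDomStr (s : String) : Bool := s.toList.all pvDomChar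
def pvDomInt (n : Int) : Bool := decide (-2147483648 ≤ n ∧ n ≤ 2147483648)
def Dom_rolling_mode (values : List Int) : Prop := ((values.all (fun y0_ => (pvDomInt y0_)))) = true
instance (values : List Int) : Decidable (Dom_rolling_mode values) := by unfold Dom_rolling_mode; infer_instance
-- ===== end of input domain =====

-- B replaces A's max-frequency candidate set + reversed membership scan by a last-occurrence
-- index table and a single lexicographic argmax over the Counter's items (idiomatic, same cost).

-- ===== PORT A =====
def rolling_mode (values : List Int) : Int :=
  if values = [] then 0
  else
    let counts := PySem.Dict.counter values
    match PySem.List.max? counts.values (fun x => x) with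
    | none => 0  -- unreachable: values ≠ [] so counts is nonempty (Python's max would raise on empty)
    | some maxFrequency =>
      let candidates : PySem.Set Int :=
        PySem.Set.ofList ((counts.items.filter (fun p => p.2 == maxFrequency)).map (fun p => p.1))
      match values.reverse.find? (fun v => PySem.Set.contains candidates v) with
      | some v => v
      | none => (PySem.List.pyGet? values (-1)).getD 0  -- values[-1] (guarded: values ≠ [])

-- ===== PORT B =====
def rolling_mode_alt (values : List Int) : Int :=
  if values = [] then 0
  else
    let counts := PySem.Dict.counter values
    let lastIndex : PySem.Dict Int Int :=
      (PySem.List.enumerate values 0).foldl (fun d p => d.insert p.2 p.1) PySem.Dict.empty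
    match PySem.List.max2? counts.items (fun kv => kv.2) (fun kv => lastIndex.getD kv.1 0) with
    | some kv => kv.1
    | none => 0  -- unreachable: counts is nonempty (Python's max would raise on empty)

-- ===== PRECONDITION & SPEC =====
def Spec_rolling_mode (values : List Int) (out : Int) : Prop := out = rolling_mode_alt values
instance (values : List Int) (out : Int) : Decidable (Spec_rolling_mode values out) := by unfold Spec_rolling_mode; infer_instance

-- ===== CLAIM (what is proved, stated in full; the proofs are below) =====
def Claim_equal_rolling_mode : Prop := ∀ (values : List Int), Dom_rolling_mode values → Spec_rolling_mode values (rolling_mode values)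

-- ===== LEMMAS AND PROOFS =====

-- idxOf is minimal: any position holding x bounds it.
theorem idxOf_le_of_getElem {x : Int} {xs : List Int} {i : Nat} (h : i < xs.length)
    (he : xs[i] = x) : List.idxOf x xs ≤ i := by
  induction xs generalizing i with
  | nil => simp at h
  | cons a t ih =>
    cases i with
    | zero => simp_all
    | succ j =>
      simp only [List.getElem_cons_succ] at he
      by_cases hax : a = x
      · simp [hax]
      · have hne : (a == x) = false := by simp [hax]
        rw [List.idxOf_cons, hne]
        simp only [cond_false]
        have := ih (by simpa using h) he
        omega

-- the fold inside max2? computes a lexicographic argmax (first maximal kept)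
theorem max2_fold_spec {α : Type} (k1 k2 : α → Int) (t : List α) : ∀ (a m : α),
    List.foldl (fun acc x => match acc with
        | none => some x
        | some mm => if (decide (k1 mm < k1 x) || !decide (k1 x < k1 mm) && decide (k2 mm < k2 x)) = true
                     then some x else some mm)
      (some a) t = some m →
    (m = a ∨ m ∈ t) ∧ (k1 a < k1 m ∨ (k1 a = k1 m ∧ k2 a ≤ k2 m)) ∧
      ∀ y ∈ t, (k1 y < k1 m ∨ (k1 y = k1 m ∧ k2 y ≤ k2 m)) := by
  induction t with
  | nil =>
    intro a m h
    simp only [List.foldl_nil, Option.some.injEq] at h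
    subst h
    exact ⟨Or.inl rfl, Or.inr ⟨rfl, le_refl _⟩, by simp⟩
  | cons x ts ih =>
    intro a m h
    simp only [List.foldl_cons] at h
    by_cases hc : (decide (k1 a < k1 x) || !decide (k1 x < k1 a) && decide (k2 a < k2 x)) = true
    · rw [if_pos hc] at h
      simp only [Bool.or_eq_true, Bool.and_eq_true, Bool.not_eq_true', decide_eq_true_eq,
        decide_eq_false_iff_not] at hc
      obtain ⟨hmem, hxm, hall⟩ := ih x m h
      refine ⟨?_, ?_, ?_⟩
      · rcases hmem with rfl | h2
        · exact Or.inr (List.mem_cons_self ..)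
        · exact Or.inr (List.mem_cons_of_mem _ h2)
      · omega
      · intro y hy
        rcases List.mem_cons.mp hy with rfl | hy
        · exact hxm
        · exact hall y hy
    · rw [if_neg hc] at h
      simp only [Bool.or_eq_true, Bool.and_eq_true, Bool.not_eq_true', decide_eq_true_eq,
        decide_eq_false_iff_not] at hc
      push_neg at hc
      obtain ⟨hmem, ham, hall⟩ := ih a m h
      refine ⟨?_, ham, ?_⟩
      · rcases hmem with rfl | h2
        · exact Or.inl rfl
        · exact Or.inr (List.mem_cons_of_mem _ h2)
      intro y hy
      rcases List.mem_cons.mp hy with rfl | hy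
      · omega
      · exact hall y hy

-- the last-write-wins index dict holds each value's last index in values
theorem lastIndex_getD (xs : List Int) (v c : Int) :
    ((PySem.List.enumerate xs 0).foldl (fun d p => d.insert p.2 p.1)
      (PySem.Dict.empty : PySem.Dict Int Int)).getD v c
    = if v ∈ xs then ((xs.length - 1 - List.idxOf v xs.reverse : Nat) : Int) else c := by
  induction xs using List.reverseRecOn with
  | nil => simp [PySem.List.enumerate, PySem.Dict.empty, PySem.Dict.getD, PySem.Dict.get?]
  | append_singleton ys x ih =>
    rw [PySem.List.enumerate_append, List.foldl_append]
    simp only [PySem.List.enumerate, List.foldl_cons, List.foldl_nil]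
    rw [PySem.Dict.getD_insert]
    by_cases hvx : v = x
    · subst hvx
      simp only [List.reverse_append, List.reverse_cons, List.reverse_nil,
        List.nil_append, List.cons_append]
      rw [if_pos (by simp)]
      simp
    · rw [if_neg hvx, ih]
      have hrev : (ys ++ [x]).reverse = x :: ys.reverse := by simp
      by_cases hm : v ∈ ys
      · rw [if_pos hm, if_pos (by simp [hm]), hrev]
        have hne : (x == v) = false := by simp [Ne.symm hvx]
        rw [List.idxOf_cons, hne]
        simp only [cond_false]
        have hi : List.idxOf v ys.reverse < ys.length := by
          have := List.idxOf_lt_length_of_mem (List.mem_reverse.mpr hm)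
          simpa using this
        have : (ys ++ [x]).length = ys.length + 1 := by simp
        rw [this]
        congr 1
        omega
      · rw [if_neg hm, if_neg (by simp [hm, hvx])]

-- candidates membership: exactly the values of maximal frequency
theorem contains_candidates (values : List Int) (M v : Int) :
    PySem.Set.contains
      (PySem.Set.ofList
        (((PySem.Dict.counter values).items.filter (fun p => p.2 == M)).map (fun p => p.1))) v = true
    ↔ v ∈ values ∧ (values.count v : Int) = M := by
  rw [show PySem.Set.contains = fun (s : PySem.Set Int) x => List.contains s x from rfl]
  simp only [List.contains_iff_mem, PySem.Set.mem_ofList, List.mem_map, List.mem_filter,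
    PySem.Dict.items_counter, beq_iff_eq]
  constructor
  · rintro ⟨p, ⟨⟨k, hk, rfl⟩, hM⟩, rfl⟩
    exact ⟨hk, hM⟩
  · intro ⟨hv, hM⟩
    exact ⟨(v, (values.count v : Int)), ⟨⟨v, hv, rfl⟩, hM⟩, rfl⟩

theorem max2_fold_some {α : Type} (k1 k2 : α → Int) (t : List α) : ∀ (a : α),
    ∃ m, List.foldl (fun acc x => match acc with
        | none => some x
        | some mm => if (decide (k1 mm < k1 x) || !decide (k1 x < k1 mm) && decide (k2 mm < k2 x)) = true
                     then some x else some mm)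
      (some a) t = some m := by
  induction t with
  | nil => intro a; exact ⟨a, rfl⟩
  | cons x ts ih =>
    intro a
    simp only [List.foldl_cons]
    by_cases hc : (decide (k1 a < k1 x) || !decide (k1 x < k1 a) && decide (k2 a < k2 x)) = true
    · rw [if_pos hc]; exact ih x
    · rw [if_neg hc]; exact ih a

theorem rolling_mode_eq (values : List Int) : rolling_mode values = rolling_mode_alt values := by
  by_cases hnil : values = []
  · subst hnil; rfl
  unfold rolling_mode rolling_mode_alt
  rw [if_neg hnil, if_neg hnil]
  obtain ⟨v0, hv0⟩ := List.exists_mem_of_ne_nil values hnil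
  have hks0 : v0 ∈ PySem.Set.ofList values := (PySem.Set.mem_ofList values v0).mpr hv0
  have hitems : (PySem.Dict.counter values).items
      = (PySem.Set.ofList values).map (fun k => (k, (List.count k values : Int))) :=
    PySem.Dict.items_counter values
  have hvals : (PySem.Dict.counter values).values
      = (PySem.Dict.counter values).items.map (fun p => p.2) := rfl
  -- the Counter is nonempty
  cases hit : (PySem.Dict.counter values).items with
  | nil =>
    exfalso
    rw [hitems] at hit
    rw [List.map_eq_nil_iff.mp hit] at hks0
    simp at hks0
  | cons k0 rest =>
  -- A's max frequency M
  cases hM : PySem.List.max? (PySem.Dict.counter values).values (fun x => x) with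
  | none =>
    exfalso
    have h0 := (PySem.List.max?_eq_none_iff _ _).mp hM
    rw [hvals, hit] at h0
    simp at h0
  | some M =>
  have hMmem := PySem.List.max?_mem hM
  have hMmax := PySem.List.max?_isMax hM
  rw [hvals, hitems] at hMmem
  simp only [List.map_map, List.mem_map, Function.comp] at hMmem
  obtain ⟨kM, hkMks, hkMeq⟩ := hMmem
  -- B's argmax m
  obtain ⟨m, hm⟩ : ∃ m, PySem.List.max2? (PySem.Dict.counter values).items (fun kv => kv.2)
      (fun kv => ((PySem.List.enumerate values 0).foldl (fun d p => d.insert p.2 p.1)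
        (PySem.Dict.empty : PySem.Dict Int Int)).getD kv.1 0) = some m := by
    rw [hit]
    exact max2_fold_some _ _ rest k0
  have hm' := hm
  rw [hit] at hm'
  obtain ⟨hmmem0, hrel0, hrelrest⟩ := max2_fold_spec _ _ rest k0 m hm'
  have hmmem : m ∈ (PySem.Dict.counter values).items := by
    rw [hit]
    rcases hmmem0 with rfl | h2
    · exact List.mem_cons_self ..
    · exact List.mem_cons_of_mem _ h2
  have hrel : ∀ y ∈ (PySem.Dict.counter values).items,
      (y.2 < m.2 ∨ (y.2 = m.2 ∧
        ((PySem.List.enumerate values 0).foldl (fun d p => d.insert p.2 p.1)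
          (PySem.Dict.empty : PySem.Dict Int Int)).getD y.1 0 ≤
        ((PySem.List.enumerate values 0).foldl (fun d p => d.insert p.2 p.1)
          (PySem.Dict.empty : PySem.Dict Int Int)).getD m.1 0)) := by
    intro y hy
    rw [hit] at hy
    rcases List.mem_cons.mp hy with rfl | hy
    · exact hrel0
    · exact hrelrest y hy
  -- m is (k, count k) for some k ∈ values
  have hmm := hmmem
  rw [hitems] at hmm
  obtain ⟨km, hkmks, hkmeq⟩ := List.mem_map.mp hmm
  have hm1 : m.1 ∈ values := by
    rw [← hkmeq]
    exact (PySem.Set.mem_ofList values km).mp hkmks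
  have hm2 : m.2 = (List.count m.1 values : Int) := by rw [← hkmeq]
  -- m has the maximal frequency: m.2 = M
  have hle : m.2 ≤ M := by
    refine hMmax m.2 ?_
    rw [hvals]
    exact List.mem_map.mpr ⟨m, hmmem, rfl⟩
  have hkMitem : (kM, (List.count kM values : Int)) ∈ (PySem.Dict.counter values).items := by
    rw [hitems]
    exact List.mem_map.mpr ⟨kM, hkMks, rfl⟩
  have hM2 : m.2 = M := by
    have := hrel _ hkMitem
    simp only at this
    omega
  -- A's reversed scan finds some r
  obtain ⟨r, hfind⟩ : ∃ r, values.reverse.find? (fun v => PySem.Set.contains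
      (PySem.Set.ofList
        (((PySem.Dict.counter values).items.filter (fun p => p.2 == M)).map (fun p => p.1))) v)
      = some r := by
    have hpm : PySem.Set.contains
        (PySem.Set.ofList
          (((PySem.Dict.counter values).items.filter (fun p => p.2 == M)).map (fun p => p.1))) m.1
        = true :=
      (contains_candidates values M m.1).mpr ⟨hm1, by rw [← hm2, hM2]⟩
    have : (values.reverse.find? _).isSome = true :=
      List.find?_isSome.mpr ⟨m.1, List.mem_reverse.mpr hm1, hpm⟩
    exact Option.isSome_iff_exists.mp this
  obtain ⟨hpr, i, hilt, hieq, hmini⟩ := List.find?_eq_some_iff_getElem.mp hfind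
  obtain ⟨hrmem, hrcount⟩ := (contains_candidates values M r).mp hpr
  -- index bookkeeping on the reversed list
  have hirlt : List.idxOf r values.reverse < values.length := by
    have := List.idxOf_lt_length_of_mem (List.mem_reverse.mpr hrmem)
    simpa using this
  have himlt : List.idxOf m.1 values.reverse < values.length := by
    have := List.idxOf_lt_length_of_mem (List.mem_reverse.mpr hm1)
    simpa using this
  have h1 : List.idxOf r values.reverse ≤ i := idxOf_le_of_getElem hilt hieq
  have h2 : i ≤ List.idxOf m.1 values.reverse := by
    by_contra hcon
    have hlt : List.idxOf m.1 values.reverse < i := by omega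
    have hfalse := hmini _ hlt
    have heq : values.reverse[List.idxOf m.1 values.reverse] = m.1 :=
      List.getElem_idxOf (by simpa using himlt)
    rw [heq] at hfalse
    have hpm : PySem.Set.contains
        (PySem.Set.ofList
          (((PySem.Dict.counter values).items.filter (fun p => p.2 == M)).map (fun p => p.1))) m.1
        = true :=
      (contains_candidates values M m.1).mpr ⟨hm1, by rw [← hm2, hM2]⟩
    simp at hfalse
    have hmeta : (m.1, M) = m := by rw [← hM2]
    exact hfalse (hmeta ▸ hmmem)
  -- B's tie-break: m.1's last index is at least r's
  have hritem : (r, (List.count r values : Int)) ∈ (PySem.Dict.counter values).items := by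
    rw [hitems]
    exact List.mem_map.mpr ⟨r, (PySem.Set.mem_ofList values r).mpr hrmem, rfl⟩
  have hL := hrel _ hritem
  simp only at hL
  have hLe : ((PySem.List.enumerate values 0).foldl (fun d p => d.insert p.2 p.1)
        (PySem.Dict.empty : PySem.Dict Int Int)).getD r 0 ≤
      ((PySem.List.enumerate values 0).foldl (fun d p => d.insert p.2 p.1)
        (PySem.Dict.empty : PySem.Dict Int Int)).getD m.1 0 := by
    rcases hL with hL | ⟨_, hL⟩
    · exfalso
      rw [hrcount, ← hM2] at hL
      omega
    · exact hL
  rw [lastIndex_getD, lastIndex_getD, if_pos hrmem, if_pos hm1] at hLe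
  have hLe' : values.length - 1 - List.idxOf r values.reverse ≤
      values.length - 1 - List.idxOf m.1 values.reverse := by exact_mod_cast hLe
  have hidx : List.idxOf r values.reverse = List.idxOf m.1 values.reverse := by omega
  have hrm : r = m.1 := by
    have hieq2 : i = List.idxOf m.1 values.reverse := by omega
    subst hieq2
    have e2 : values.reverse[List.idxOf m.1 values.reverse]'(by simpa using himlt) = m.1 :=
      List.getElem_idxOf (by simpa using himlt)
    rw [← hieq, e2]
  simp only [hM, hfind, hm]
  exact hrm

-- ===== VERDICT (by name: the statement is the Claim_ definition above) =====
theorem rolling_mode_spec : Claim_equal_rolling_mode := by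
  intro values _
  unfold Spec_rolling_mode
  exact rolling_mode_eq values
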